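-- pv_equiv track=rewrite | github.com/AMS-QF/TAQ-Data | pipelines/generators.py | generate_volume_span
-- ===== SOURCE A (Python) =====
-- def generate_volume_span(span, trade_volumes):
--     """
--     Generate volume spans for the given trade volumes.
--
--     This function calculates the volume spans for the provided trade volumes using a sliding window approach.
--     A volume span represents the index (position) in the trade volumes list, from which the cumulative sum of volumes
--     reaches or exceeds the specified `span` value.
--
--     Parameters:
--     ----------
--     span : int
--         The target sum of volumes to be reached.
--     trade_volumes : list
--         A list of trade volumes (integers) for which the volume spans need to be calculated.
--
--     Returns:
--     -------
--     list
--         A list containing the volume spans for the trade volumes.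
--
--     """
--     volume_spans = []
--     for idx, val in enumerate(trade_volumes):
--         cur = max(idx - 1, 0)
--         # Sliding window to find the volume span
--         while cur >= 0:
--             if cur == 0:
--                 volume_spans.append(0)
--                 break
--             if sum(trade_volumes[cur:idx + 1]) >= span:
--                 volume_spans.append(cur + 1)
--                 break
--             cur -= 1
--
--     return volume_spans
-- ===== SOURCE B (Python) =====
-- def generate_volume_span(span, trade_volumes):
--     """Prefix sums computed once, then for each index a direct scan for the
--     nearest window start whose prefix-sum difference reaches `span` (no
--     repeated slice summation)."""
--     n = len(trade_volumes)
--     prefix = [0]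
--     total = 0
--     for v in trade_volumes:
--         total += v
--         prefix.append(total)
--
--     def find_start(idx):
--         for cur in range(idx - 1, 0, -1):
--             if prefix[idx + 1] - prefix[cur] >= span:
--                 return cur + 1
--         return 0
--
--     return [find_start(idx) for idx in range(n)]
-- ===== Notes on version B (the rewrite author's own statement) =====
-- stated objective: faster
-- what changed: B precomputes a prefix-sum array once so each window test is an O(1) subtraction instead of A's O(n) slice-and-sum inside the nested scan.
import Mathlib
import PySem

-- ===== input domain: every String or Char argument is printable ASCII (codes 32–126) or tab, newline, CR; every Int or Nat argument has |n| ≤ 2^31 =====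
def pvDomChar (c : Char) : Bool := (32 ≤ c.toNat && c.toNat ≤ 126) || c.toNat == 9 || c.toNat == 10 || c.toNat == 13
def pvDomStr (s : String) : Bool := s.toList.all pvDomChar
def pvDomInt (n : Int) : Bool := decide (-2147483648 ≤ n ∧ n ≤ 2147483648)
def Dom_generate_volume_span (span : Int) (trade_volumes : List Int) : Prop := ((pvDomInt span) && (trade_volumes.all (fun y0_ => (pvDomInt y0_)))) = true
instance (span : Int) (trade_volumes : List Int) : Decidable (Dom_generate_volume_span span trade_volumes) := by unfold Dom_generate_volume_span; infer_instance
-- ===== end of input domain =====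

-- B replaces A's repeated slice summation by a prefix-sum array built once (faster: O(n^2) vs O(n^3)).

-- ===== PORT A =====
-- A's while-loop: cur starts at max(idx-1,0) ≥ 0 and only decreases; represented as a Nat.
-- cur = 0 appends 0 and breaks; otherwise if sum(trade_volumes[cur:idx+1]) >= span appends cur+1 and breaks.
def pvALoop (span : Int) (tv : List Int) (idx : Nat) : Nat → List Int
  | 0 => [0]
  | k + 1 =>
      if (PySem.List.slice tv (some ((k : Int) + 1)) (some ((idx : Int) + 1))).sum ≥ span then
        [(k : Int) + 2]
      else pvALoop span tv idx k

def generate_volume_span (span : Int) (trade_volumes : List Int) : List Int :=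
  (PySem.List.enumerate trade_volumes 0).foldl
    (fun acc p => acc ++ pvALoop span trade_volumes p.1.toNat ((max (p.1 - 1) 0).toNat)) []

-- ===== PORT B =====
-- Source B's prefix loop: prefix = [0]; total = 0; for v: total += v; prefix.append(total)
def pvPrefix (tv : List Int) : List Int :=
  (tv.foldl (fun (st : List Int × Int) v => (st.1 ++ [st.2 + v], st.2 + v)) ([0], 0)).1

-- Source B's find_start: for cur in range(idx-1, 0, -1) counting down; argument is the first cur.
def pvBLoop (span : Int) (pre : List Int) (idx : Nat) : Nat → Int
  | 0 => 0
  | k + 1 =>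
      if pre.getD (idx + 1) 0 - pre.getD (k + 1) 0 ≥ span then (k : Int) + 2
      else pvBLoop span pre idx k

def generate_volume_span_alt (span : Int) (trade_volumes : List Int) : List Int :=
  let pre := pvPrefix trade_volumes
  (List.range trade_volumes.length).map (fun idx => pvBLoop span pre idx (idx - 1))

-- ===== PRECONDITION & SPEC =====
def Spec_generate_volume_span (span : Int) (trade_volumes : List Int) (out : List Int) : Prop := out = generate_volume_span_alt span trade_volumes
instance (span : Int) (trade_volumes : List Int) (out : List Int) : Decidable (Spec_generate_volume_span span trade_volumes out) := by unfold Spec_generate_volume_span; infer_instance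

-- ===== CLAIM (what is proved, stated in full; the proofs are below) =====
def Claim_equal_generate_volume_span : Prop := ∀ (span : Int) (trade_volumes : List Int), Dom_generate_volume_span span trade_volumes → Spec_generate_volume_span span trade_volumes (generate_volume_span span trade_volumes)

-- ===== LEMMAS AND PROOFS =====

theorem pvPrefix_aux (tv : List Int) : ∀ (acc : List Int) (t : Int),
    (tv.foldl (fun (st : List Int × Int) v => (st.1 ++ [st.2 + v], st.2 + v)) (acc, t)).1
      = acc ++ (List.range tv.length).map (fun i => t + (tv.take (i + 1)).sum) := by
  induction tv with
  | nil => simp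
  | cons v rest ih =>
      intro acc t
      simp [List.foldl_cons, ih, List.range_succ_eq_map, List.map_map]
      intro a _
      ring

theorem pvPrefix_eq (tv : List Int) :
    pvPrefix tv = (List.range (tv.length + 1)).map (fun i => (tv.take i).sum) := by
  unfold pvPrefix
  rw [pvPrefix_aux]
  rw [List.range_succ_eq_map, List.map_cons, List.map_map]
  simp

theorem pvPrefix_getD (tv : List Int) (j : Nat) (hj : j ≤ tv.length) :
    (pvPrefix tv).getD j 0 = (tv.take j).sum := by
  rw [pvPrefix_eq]
  rw [List.getD_eq_getElem?_getD, List.getElem?_map, List.getElem?_range (by omega : j < tv.length + 1)]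
  simp

theorem slice_sum_eq (tv : List Int) (a b : Nat) (hab : a ≤ b) :
    (PySem.List.slice tv (some (a : Int)) (some (b : Int))).sum
      = (tv.take b).sum - (tv.take a).sum := by
  rw [PySem.List.slice_natCast]
  have h1 : (tv.take b).drop a = (tv.drop a).take (b - a) := List.drop_take
  rw [← h1]
  have h2 : tv.take b = (tv.take b).take a ++ (tv.take b).drop a := (List.take_append_drop a (tv.take b)).symm
  have h3 : (tv.take b).take a = tv.take a := by
    rw [List.take_take]
    congr 1
    omega
  have := congrArg List.sum h2
  rw [List.sum_append, h3] at this
  omega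

theorem loop_eq (span : Int) (tv : List Int) (idx : Nat) (hidx : idx < tv.length) :
    ∀ k, k ≤ idx → pvALoop span tv idx k = [pvBLoop span (pvPrefix tv) idx k] := by
  intro k
  induction k with
  | zero => intro _; simp [pvALoop, pvBLoop]
  | succ k ih =>
      intro hk
      have hcond :
          (PySem.List.slice tv (some ((k : Int) + 1)) (some ((idx : Int) + 1))).sum
            = (pvPrefix tv).getD (idx + 1) 0 - (pvPrefix tv).getD (k + 1) 0 := by
        have e1 : ((k : Int) + 1) = ((k + 1 : Nat) : Int) := by push_cast; ring
        have e2 : ((idx : Int) + 1) = ((idx + 1 : Nat) : Int) := by push_cast; ring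
        rw [e1, e2, slice_sum_eq tv (k + 1) (idx + 1) (by omega),
            pvPrefix_getD tv (idx + 1) (by omega), pvPrefix_getD tv (k + 1) (by omega)]
      rw [pvALoop, pvBLoop, hcond]
      split
      · rfl
      · rw [ih (by omega)]

theorem flatMap_singleton_eq_map {α β : Type} (g : α → β) (l : List α) :
    l.flatMap (fun x => [g x]) = l.map g := by
  induction l with
  | nil => rfl
  | cons x xs ih => simp [List.flatMap_cons, ih]

theorem generate_eq (span : Int) (tv : List Int) :
    generate_volume_span span tv = generate_volume_span_alt span tv := by
  unfold generate_volume_span generate_volume_span_alt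
  rw [PySem.List.foldl_append_eq_flatMap, PySem.List.enumerate_eq_map_pyRange tv 0,
      List.flatMap_map, PySem.List.pyRange_one, List.flatMap_map, List.nil_append]
  have hlen : ((PySem.List.len tv) - 0).toNat = tv.length := by simp [PySem.List.len]
  rw [hlen]
  have step : ∀ k ∈ List.range tv.length,
      pvALoop span tv ((0 : Int) + (k : Int)).toNat ((max ((0 : Int) + (k : Int) - 1) 0).toNat)
        = [pvBLoop span (pvPrefix tv) k (k - 1)] := by
    intro k hk
    have hklt : k < tv.length := List.mem_range.mp hk
    have e1 : ((0 : Int) + (k : Int)).toNat = k := by omega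
    have e2 : ((max ((0 : Int) + (k : Int) - 1) 0).toNat) = k - 1 := by omega
    rw [e1, e2]
    exact loop_eq span tv k hklt (k - 1) (by omega)
  dsimp only
  rw [List.flatMap_def, List.map_congr_left step, ← List.flatMap_def, flatMap_singleton_eq_map]

-- ===== VERDICT (by name: the statement is the Claim_ definition above) =====
theorem generate_volume_span_spec : Claim_equal_generate_volume_span := by
  intro span tv _
  unfold Spec_generate_volume_span
  exact generate_eq span tv
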